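-- pv_equiv track=rewrite | github.com/lmun/competitiveProgramingSolutions | projectEuler/111.py | numify
-- ===== SOURCE A (Python) =====
-- def numify(num):
-- 	arr = [0] * 10
-- 	x = num
-- 	while x > 0:
-- 		arr[x % 10] += 1
-- 		x //= 10
-- 	res = 0
-- 	for i in reversed(range(10)):
-- 		res *= 2
-- 		if arr[i] == 1:
-- 			res += 1
-- 	return res
-- ===== SOURCE B (Python) =====
-- def numify(num):
--     once = set()
--     more = set()
--     x = num
--     while x > 0:
--         d = x % 10
--         if d in more:
--             pass
--         elif d in once:
--             once.discard(d)
--             more.add(d)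
--         else:
--             once.add(d)
--         x //= 10
--     return sum(1 << d for d in once)
-- ===== Notes on version B (the rewrite author's own statement) =====
-- stated objective: alternative
-- what changed: Replaces the 10-slot count array and the second reversed-range accumulation pass with a single pass that maintains two sets (digits seen exactly once / seen more), summing 1<<d over the 'once' set at the end.
import Mathlib
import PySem

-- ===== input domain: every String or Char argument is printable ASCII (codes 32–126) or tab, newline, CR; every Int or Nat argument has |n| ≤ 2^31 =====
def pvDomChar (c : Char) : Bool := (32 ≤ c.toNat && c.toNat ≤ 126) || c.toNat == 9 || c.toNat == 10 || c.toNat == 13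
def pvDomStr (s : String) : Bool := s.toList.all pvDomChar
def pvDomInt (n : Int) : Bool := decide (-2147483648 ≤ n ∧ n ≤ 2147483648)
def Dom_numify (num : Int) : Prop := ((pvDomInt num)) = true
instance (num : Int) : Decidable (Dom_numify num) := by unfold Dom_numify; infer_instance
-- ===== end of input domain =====

-- B replaces the count array + second reversed pass with one pass over two sets (digits
-- seen exactly once / seen more than once); same asymptotic cost, alternative structure.

-- ===== PORT A =====
-- while x > 0: arr[x % 10] += 1; x //= 10   (index x % 10 is always in [0,10); arr has length 10)
def numifyLoopA (x : Int) (arr : List Int) : List Int :=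
  if h : x > 0 then
    numifyLoopA (PySem.Int.floordiv x 10)
      (PySem.List.pySetD arr (PySem.Int.mod x 10)
        (PySem.List.pyGetD arr (PySem.Int.mod x 10) 0 + 1))
  else arr
termination_by x.toNat
decreasing_by
  have h10 : PySem.Int.floordiv x 10 = x / 10 := PySem.Int.floordiv_eq_ediv_of_pos (by omega)
  have h1 : x / 10 * 10 ≤ x := Int.ediv_mul_le x (by omega)
  have h2 : 0 ≤ x / 10 := Int.ediv_nonneg (by omega) (by omega)
  omega

def numify (num : Int) : Int :=
  let arr := List.replicate 10 (0 : Int)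
  let arr := numifyLoopA num arr
  ((PySem.List.pyRange 0 10 1).reverse).foldl
    (fun res i =>
      let res := res * 2
      if PySem.List.pyGetD arr i 0 = 1 then res + 1 else res) 0

-- ===== PORT B =====
-- while x > 0: d = x % 10; if d in more: pass elif d in once: move d from once to more else: add d to once
def numifyLoopB (x : Int) (once more : PySem.Set Int) : PySem.Set Int × PySem.Set Int :=
  if h : x > 0 then
    let d := PySem.Int.mod x 10
    if PySem.Set.contains more d then
      numifyLoopB (PySem.Int.floordiv x 10) once more
    else if PySem.Set.contains once d then
      numifyLoopB (PySem.Int.floordiv x 10) (PySem.Set.discard once d) (PySem.Set.add more d)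
    else
      numifyLoopB (PySem.Int.floordiv x 10) (PySem.Set.add once d) more
  else (once, more)
termination_by x.toNat
decreasing_by
  all_goals
    have h10 : PySem.Int.floordiv x 10 = x / 10 := PySem.Int.floordiv_eq_ediv_of_pos (by omega)
    have h1 : x / 10 * 10 ≤ x := Int.ediv_mul_le x (by omega)
    have h2 : 0 ≤ x / 10 := Int.ediv_nonneg (by omega) (by omega)
    omega

-- sum(1 << d for d in once): every d in once satisfies 0 ≤ d < 10, so 1 << d = 2 ^ d.toNat;
-- the sum is order-independent, so folding the set's element list is exact.
def numify_alt (num : Int) : Int :=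
  let p := numifyLoopB num PySem.Set.empty PySem.Set.empty
  p.1.foldl (fun s d => s + 2 ^ d.toNat) 0

-- ===== PRECONDITION & SPEC =====
def Spec_numify (num : Int) (out : Int) : Prop := out = numify_alt num
instance (num : Int) (out : Int) : Decidable (Spec_numify num out) := by unfold Spec_numify; infer_instance

-- ===== CLAIM (what is proved, stated in full; the proofs are below) =====
def Claim_equal_numify : Prop := ∀ (num : Int), Dom_numify num → Spec_numify num (numify num)

-- ===== LEMMAS AND PROOFS =====

-- The invariant tying A's count array to B's two sets.
def DigInv (arr : List Int) (once more : List Int) : Prop :=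
  arr.length = 10 ∧ once.Nodup ∧
  (∀ d ∈ once, 0 ≤ d ∧ d < 10) ∧ (∀ d ∈ more, 0 ≤ d ∧ d < 10) ∧
  (∀ i : Nat, i < 10 →
    0 ≤ arr.getD i 0 ∧ ((i : Int) ∈ once ↔ arr.getD i 0 = 1) ∧
    ((i : Int) ∈ more ↔ 2 ≤ arr.getD i 0))

theorem digInv_init : DigInv (List.replicate 10 (0 : Int)) [] [] := by
  refine ⟨by simp, by simp, by simp, by simp, ?_⟩
  intro i hi
  interval_cases i <;> simp

theorem digInv_step (arr once more : List Int) (d : Int) (hd0 : 0 ≤ d) (hd10 : d < 10)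
    (hinv : DigInv arr once more) :
    DigInv (PySem.List.pySetD arr d (PySem.List.pyGetD arr d 0 + 1))
      (if PySem.Set.contains more d then once
       else if PySem.Set.contains once d then PySem.Set.discard once d else PySem.Set.add once d)
      (if PySem.Set.contains more d then more
       else if PySem.Set.contains once d then PySem.Set.add more d else more) := by
  obtain ⟨hlen, hnd, hob, hmb, hchar⟩ := hinv
  have hdk : d = (d.toNat : Int) := by omega
  set k := d.toNat with hkdef
  have hk10 : k < 10 := by omega
  have hset : PySem.List.pySetD arr d (PySem.List.pyGetD arr d 0 + 1)
      = arr.set k (arr.getD k 0 + 1) := by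
    rw [hdk]; simp
  rw [hset]
  have hget' : ∀ i : Nat, i < 10 →
      (arr.set k (arr.getD k 0 + 1)).getD i 0 = if i = k then arr.getD k 0 + 1 else arr.getD i 0 := by
    intro i hi
    by_cases h : i = k
    · subst h; simp [List.getD, List.getElem?_set, hlen, hi]
    · rw [List.getD, List.getD, List.getD, List.getElem?_set, if_neg (fun hh : k = i => h hh.symm), if_neg h]
  have hcast : ∀ i : Nat, ((i : Int) = d ↔ i = k) := by intro i; omega
  have hck := hchar k hk10
  by_cases hm : PySem.Set.contains more d = true
  · have hmem : d ∈ more := (PySem.Set.contains_iff more d).mp hm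
    have hcd : 2 ≤ arr.getD k 0 := (hck.2.2).mp (hdk ▸ hmem)
    simp only [hm, if_true]
    refine ⟨by simp [hlen], hnd, hob, hmb, ?_⟩
    intro i hi
    rw [hget' i hi]
    rcases hchar i hi with ⟨h0, h1, h2⟩
    by_cases h : i = k
    · subst h; simp only [if_pos rfl, ite_true]; constructor
      · omega
      · constructor
        · constructor
          · intro hmem'; exact absurd ((h1).mp hmem') (by omega)
          · omega
        · constructor
          · intro _; omega
          · intro _; exact hdk ▸ hmem
    · simp only [if_neg h]; exact ⟨h0, h1, h2⟩
  · have hmem : d ∉ more := by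
      intro hh; exact hm ((PySem.Set.contains_iff more d).mpr hh)
    by_cases ho : PySem.Set.contains once d = true
    · have homem : d ∈ once := (PySem.Set.contains_iff once d).mp ho
      have hcd : arr.getD k 0 = 1 := (hck.2.1).mp (hdk ▸ homem)
      simp only [hm, ho, if_true, if_false, Bool.false_eq_true]
      refine ⟨by simp [hlen], PySem.Set.nodup_discard once d hnd, ?_, ?_, ?_⟩
      · intro e he; exact hob e ((PySem.Set.mem_discard _ _ _).mp he).1
      · intro e he
        rcases (PySem.Set.mem_add _ _ _).mp he with h | h
        · exact hmb e h
        · subst h; omega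
      · intro i hi
        rw [hget' i hi]
        rcases hchar i hi with ⟨h0, h1, h2⟩
        by_cases h : i = k
        · subst h
          simp only [if_pos rfl, ite_true, PySem.Set.mem_discard, PySem.Set.mem_add]
          refine ⟨by omega, ?_, ?_⟩
          · constructor
            · rintro ⟨_, hne⟩; exact (hne hdk.symm).elim
            · intro hh; exact absurd hh (by omega)
          · constructor
            · intro _; omega
            · intro _; right; exact hdk.symm
        · simp only [if_neg h, PySem.Set.mem_discard, PySem.Set.mem_add]
          have hne : (i : Int) ≠ d := by omega
          refine ⟨h0, ?_, ?_⟩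
          · constructor
            · rintro ⟨hmem', _⟩; exact h1.mp hmem'
            · intro hh; exact ⟨h1.mpr hh, hne⟩
          · constructor
            · rintro (hh | hh)
              · exact h2.mp hh
              · exact absurd hh hne
            · intro hh; left; exact h2.mpr hh
    · have honmem : d ∉ once := by
        intro hh; exact ho ((PySem.Set.contains_iff once d).mpr hh)
      have hcd : arr.getD k 0 = 0 := by
        have h1 := (hck.2.1); have h2 := (hck.2.2); have h0 := hck.1
        have : ¬ arr.getD k 0 = 1 := fun hh => honmem (hdk ▸ (h1.mpr hh))
        have : ¬ 2 ≤ arr.getD k 0 := fun hh => hmem (hdk ▸ (h2.mpr hh))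
        omega
      simp only [hm, ho, if_false, Bool.false_eq_true]
      refine ⟨by simp [hlen], PySem.Set.nodup_add once d hnd, ?_, hmb, ?_⟩
      · intro e he
        rcases (PySem.Set.mem_add _ _ _).mp he with h | h
        · exact hob e h
        · subst h; omega
      · intro i hi
        rw [hget' i hi]
        rcases hchar i hi with ⟨h0, h1, h2⟩
        by_cases h : i = k
        · subst h
          simp only [if_pos rfl, ite_true, PySem.Set.mem_add]
          refine ⟨by omega, ?_, ?_⟩
          · constructor
            · intro _; omega
            · intro _; right; exact hdk.symm
          · constructor
            · intro hh; exact (hmem (by rw [hdk]; exact hh)).elim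
            · omega
        · have hne : (i : Int) ≠ d := by omega
          simp only [if_neg h, PySem.Set.mem_add]
          refine ⟨h0, ?_, h2⟩
          constructor
          · rintro (hh | hh)
            · exact h1.mp hh
            · exact absurd hh hne
          · intro hh; left; exact h1.mpr hh

theorem loops_inv : ∀ (n : Nat) (x : Int), x.toNat ≤ n → ∀ arr once more, DigInv arr once more →
    DigInv (numifyLoopA x arr) (numifyLoopB x once more).1 (numifyLoopB x once more).2 := by
  intro n
  induction n with
  | zero =>
    intro x hx arr once more hinv
    rw [numifyLoopA, numifyLoopB]
    have : ¬ x > 0 := by omega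
    simp only [this, dite_false]
    exact hinv
  | succ n ih =>
    intro x hx arr once more hinv
    rw [numifyLoopA, numifyLoopB]
    by_cases hpos : x > 0
    · simp only [hpos, dite_true]
      have hd0 : 0 ≤ PySem.Int.mod x 10 := PySem.Int.mod_nonneg x (by omega)
      have hd10 : PySem.Int.mod x 10 < 10 := PySem.Int.mod_lt x (by omega)
      have hx' : (PySem.Int.floordiv x 10).toNat ≤ n := by
        have h10 : PySem.Int.floordiv x 10 = x / 10 := PySem.Int.floordiv_eq_ediv_of_pos (by omega)
        have h1 : x / 10 * 10 ≤ x := Int.ediv_mul_le x (by omega)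
        have h2 : 0 ≤ x / 10 := Int.ediv_nonneg (by omega) (by omega)
        omega
      have hstep := digInv_step arr once more (PySem.Int.mod x 10) hd0 hd10 hinv
      by_cases hm : PySem.Set.contains more (PySem.Int.mod x 10)
      · simp only [hm, if_true] at hstep ⊢
        exact ih _ hx' _ _ _ hstep
      · by_cases ho : PySem.Set.contains once (PySem.Int.mod x 10)
        · simp only [hm, ho, if_true, if_false] at hstep ⊢
          exact ih _ hx' _ _ _ hstep
        · simp only [hm, ho, if_false] at hstep ⊢
          exact ih _ hx' _ _ _ hstep
    · simp only [hpos, dite_false]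
      exact hinv

theorem foldl_sum_pow (l : List Int) : ∀ init : Int,
    l.foldl (fun s d => s + 2 ^ d.toNat) init = init + (l.map (fun d => (2:Int) ^ d.toNat)).sum := by
  induction l with
  | nil => intro init; simp
  | cons a l ih => intro init; simp [List.foldl_cons, ih]; ring

theorem revfold_sum (p : Nat → Prop) [DecidablePred p] :
    ∀ (n : Nat) (r : Int), ((List.range n).reverse).foldl
        (fun res i => if p i then res * 2 + 1 else res * 2) r
      = r * 2 ^ n + (((List.range n).filter (fun i => decide (p i))).map (fun i => (2:Int) ^ i)).sum := by
  intro n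
  induction n with
  | zero => intro r; simp
  | succ n ih =>
    intro r
    rw [List.range_succ, List.reverse_append]
    simp only [List.reverse_cons, List.reverse_nil, List.nil_append, List.cons_append,
      List.foldl_cons, List.filter_append, List.map_append, List.sum_append]
    rw [ih]
    by_cases hp : p n
    · simp [hp]; ring
    · simp [hp]; ring

theorem base_sum (arr once more : List Int) (hinv : DigInv arr once more) :
    ((PySem.List.pyRange 0 10 1).reverse).foldl
      (fun (res : Int) i =>
        if PySem.List.pyGetD arr i 0 = 1 then res * 2 + 1 else res * 2) (0 : Int)
    = once.foldl (fun s d => s + 2 ^ d.toNat) (0 : Int) := by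
  obtain ⟨hlen, hnd, hob, hmb, hchar⟩ := hinv
  have h1 : PySem.List.pyRange 0 10 1 = List.map (Nat.cast : Nat → Int) (List.range 10) := by decide
  have hL : ((PySem.List.pyRange 0 10 1).reverse).foldl
      (fun (res : Int) i =>
        if PySem.List.pyGetD arr i 0 = 1 then res * 2 + 1 else res * 2) (0 : Int)
      = ((List.range 10).reverse).foldl
        (fun (res : Int) i => if arr.getD i 0 = 1 then res * 2 + 1 else res * 2) (0 : Int) := by
    rw [h1, ← List.map_reverse, List.foldl_map]
    simp [PySem.List.pyGetD_natCast]
  rw [hL, revfold_sum (fun i => arr.getD i 0 = 1) 10 0]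
  -- right side: fold = sum over once
  rw [foldl_sum_pow]
  set L : List Int := List.map (Nat.cast : Nat → Int)
      ((List.range 10).filter (fun i => decide (arr.getD i 0 = 1))) with hLdef
  have hLnd : L.Nodup := by
    refine List.Nodup.map (fun a b h => by exact_mod_cast h) ?_
    exact List.Nodup.filter _ (List.nodup_range)
  have hperm : once.Perm L := by
    rw [List.perm_ext_iff_of_nodup hnd hLnd]
    intro e
    constructor
    · intro he
      rcases hob e he with ⟨he0, he10⟩
      have hek : e = ((e.toNat : Nat) : Int) := by omega
      have := (hchar e.toNat (by omega)).2.1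
      rw [hLdef]
      refine List.mem_map.mpr ⟨e.toNat, ?_, by omega⟩
      refine List.mem_filter.mpr ⟨List.mem_range.mpr (by omega), ?_⟩
      simp only [decide_eq_true_iff]
      exact this.mp (hek ▸ he)
    · intro he
      rcases List.mem_map.mp he with ⟨i, hif, hie⟩
      rcases List.mem_filter.mp hif with ⟨hir, hq⟩
      have hi10 : i < 10 := List.mem_range.mp hir
      have := (hchar i hi10).2.1
      have : (i : Int) ∈ once := this.mpr (by simpa using hq)
      rwa [hie] at this
  have hsum : (once.map (fun d => (2:Int) ^ d.toNat)).sum = (L.map (fun d => (2:Int) ^ d.toNat)).sum :=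
    (hperm.map _).sum_eq
  rw [hsum, hLdef, List.map_map]
  simp [Function.comp_def, Int.toNat_natCast]

-- ===== VERDICT (by name: the statement is the Claim_ definition above) =====
theorem numify_spec : Claim_equal_numify := by
  intro num _
  unfold Spec_numify
  simp only [numify, numify_alt]
  have h := loops_inv num.toNat num le_rfl (List.replicate 10 0) PySem.Set.empty PySem.Set.empty digInv_init
  exact base_sum _ _ _ h
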